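-- pv_equiv track=rewrite | github.com/jowettsam-create/bay-basin-roster | roster_boundary_validator.py | get_max_consecutive_working_days
-- ===== SOURCE A (Python) =====
-- from typing import List, Tuple, Optional
--
-- def get_max_consecutive_working_days(shifts: List[str]) -> int:
--     """
--     Calculate maximum consecutive working days in a shift sequence
--
--     Args:
--         shifts: List of shift types ('D', 'N', 'O')
--
--     Returns:
--         Maximum number of consecutive working days
--     """
--     max_consecutive = 0
--     current_consecutive = 0
--
--     for shift in shifts:
--         if shift in ['D', 'N']:
--             current_consecutive += 1
--             max_consecutive = max(max_consecutive, current_consecutive)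
--         else:
--             current_consecutive = 0
--
--     return max_consecutive
-- ===== SOURCE B (Python) =====
-- def get_max_consecutive_working_days(shifts):
--     """
--     Calculate maximum consecutive working days in a shift sequence.
--
--     Run-based re-implementation: partition the flag sequence into maximal
--     runs; measure each leading run of working days, then skip past it and
--     the rest day that ended it.
--     """
--     working = [s in ('D', 'N') for s in shifts]
--     best = 0
--     while working:
--         run = 0
--         while run < len(working) and working[run]:
--             run += 1
--         best = max(best, run)
--         # skip this run and the rest day that terminated it (if any)
--         working = working[run + 1:]
--     return best
-- ===== Notes on version B (the rewrite author's own statement) =====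
-- stated objective: alternative
-- what changed: Replaces the running counter with max tracking by a run-based scan: the sequence is partitioned into maximal runs of working days, each run's full length is measured at once and the scan jumps past the run and its terminating rest day.
import Mathlib
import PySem

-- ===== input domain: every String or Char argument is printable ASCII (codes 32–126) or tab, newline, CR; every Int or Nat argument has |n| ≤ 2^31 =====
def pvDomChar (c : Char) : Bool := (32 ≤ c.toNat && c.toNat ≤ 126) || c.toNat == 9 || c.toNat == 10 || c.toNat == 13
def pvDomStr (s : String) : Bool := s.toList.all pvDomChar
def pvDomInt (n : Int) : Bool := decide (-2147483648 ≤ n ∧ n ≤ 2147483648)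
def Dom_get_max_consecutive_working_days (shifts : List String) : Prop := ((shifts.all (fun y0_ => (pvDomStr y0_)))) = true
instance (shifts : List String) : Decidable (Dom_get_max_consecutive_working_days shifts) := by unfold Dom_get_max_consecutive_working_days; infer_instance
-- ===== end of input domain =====

-- B replaces A's running counter by a run-based scan (measure each maximal run, then jump past it); alternative decomposition, same cost.


-- ===== PORT A =====
-- for shift in shifts: if shift in ['D','N']: current += 1; max = max(max, current) else: current = 0
def get_max_consecutive_working_days (shifts : List String) : Int :=
  (shifts.foldl
    (fun (st : Int × Int) shift =>
      if shift ∈ ["D", "N"] then (max st.1 (st.2 + 1), st.2 + 1)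
      else (st.1, 0))
    (0, 0)).1

-- ===== PORT B =====
-- inner while: run = 0; while run < len(working) and working[run]: run += 1  (= length of the leading run of True)
def altRunLen : List Bool → Nat
  | [] => 0
  | b :: t => if b then altRunLen t + 1 else 0

-- outer while: while working: … best = max(best, run); working = working[run+1:]
def altLoop : List Bool → Int → Int
  | [], best => best
  | b :: t, best =>
    let run := altRunLen (b :: t)
    altLoop ((b :: t).drop (run + 1)) (max best (run : Int))
termination_by bs _ => bs.length
decreasing_by simp [List.length_drop]

def get_max_consecutive_working_days_alt (shifts : List String) : Int :=
  altLoop (shifts.map (fun s => decide (s ∈ ["D", "N"]))) 0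

-- ===== PRECONDITION & SPEC =====
def Spec_get_max_consecutive_working_days (shifts : List String) (out : Int) : Prop := out = get_max_consecutive_working_days_alt shifts
instance (shifts : List String) (out : Int) : Decidable (Spec_get_max_consecutive_working_days shifts out) := by unfold Spec_get_max_consecutive_working_days; infer_instance

-- ===== CLAIM (what is proved, stated in full; the proofs are below) =====
def Claim_equal_get_max_consecutive_working_days : Prop := ∀ (shifts : List String), Dom_get_max_consecutive_working_days shifts → Spec_get_max_consecutive_working_days shifts (get_max_consecutive_working_days shifts)

-- ===== LEMMAS AND PROOFS =====

-- barB bs c = maximum run length of True in bs, where the run at the front is credited c extra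
def barB : List Bool → Int → Int
  | [], c => c
  | true :: t, c => barB t (c + 1)
  | false :: t, c => max c (barB t 0)

lemma barB_nonneg : ∀ (bs : List Bool) (c : Int), c ≤ barB bs c := by
  intro bs
  induction bs with
  | nil => intro c; simp [barB]
  | cons b t ih =>
    intro c
    cases b with
    | true => have := ih (c + 1); simp only [barB]; omega
    | false => simp only [barB]; exact le_max_left _ _

lemma barB_replicate_true : ∀ (k : Nat) (rest : List Bool) (c : Int),
    barB (List.replicate k true ++ rest) c = barB rest (c + k) := by
  intro k
  induction k with
  | zero => intro rest c; simp
  | succ k ih =>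
    intro rest c
    simp only [List.replicate_succ, List.cons_append, barB, ih]
    congr 1
    push_cast
    ring

lemma altRunLen_take : ∀ (bs : List Bool),
    bs.take (altRunLen bs) = List.replicate (altRunLen bs) true := by
  intro bs
  induction bs with
  | nil => simp [altRunLen]
  | cons b t ih =>
    cases b with
    | true => simp [altRunLen, List.replicate_succ, ih]
    | false => simp [altRunLen]

lemma altRunLen_drop : ∀ (bs : List Bool),
    bs.drop (altRunLen bs) = [] ∨ ∃ r, bs.drop (altRunLen bs) = false :: r := by
  intro bs
  induction bs with
  | nil => left; simp
  | cons b t ih =>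
    cases b with
    | true => simpa [altRunLen] using ih
    | false => right; exact ⟨t, by simp [altRunLen]⟩

lemma altLoop_eq : ∀ (bs : List Bool) (best : Int), 0 ≤ best →
    altLoop bs best = max best (barB bs 0) := by
  intro bs best
  induction bs, best using altLoop.induct with
  | case1 best => intro _; simp [altLoop, barB]; omega
  | case2 b t best run ih =>
    intro hbest
    rw [altLoop]
    have hrun0 : (0 : Int) ≤ (run : Int) := by positivity
    have ih' := ih (by omega)
    have hsplit : (b :: t) = List.replicate run true ++ (b :: t).drop run := by
      conv_lhs => rw [← List.take_append_drop run (b :: t)]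
      rw [altRunLen_take]
    have hbar : barB (b :: t) 0 = barB ((b :: t).drop run) run := by
      conv_lhs => rw [hsplit]
      rw [barB_replicate_true]; norm_num
    rcases altRunLen_drop (b :: t) with hd | ⟨r, hd⟩
    · have hd1 : (b :: t).drop (run + 1) = [] := by
        have : (b :: t).drop (run + 1) = ((b :: t).drop run).drop 1 := by
          rw [List.drop_drop]
        rw [this, hd]; simp
      rw [hd1] at ih'
      rw [hd1, ih', hbar, hd]
      simp [barB]
    · have hd1 : (b :: t).drop (run + 1) = r := by
        have : (b :: t).drop (run + 1) = ((b :: t).drop run).drop 1 := by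
          rw [List.drop_drop]
        rw [this, hd]; simp
      rw [hd1] at ih'
      rw [hd1, ih', hbar, hd]
      simp only [barB]
      have h0 : (0 : Int) ≤ barB r 0 := barB_nonneg r 0
      omega

lemma foldA_eq : ∀ (bs : List Bool) (m c : Int), 0 ≤ c → c ≤ m →
    (bs.foldl
      (fun (st : Int × Int) b =>
        if b then (max st.1 (st.2 + 1), st.2 + 1) else (st.1, 0)) (m, c)).1
      = max m (barB bs c) := by
  intro bs
  induction bs with
  | nil => intro m c h0 hcm; simp [barB]; omega
  | cons b t ih =>
    intro m c h0 hcm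
    cases b with
    | true =>
      simp only [List.foldl_cons]
      rw [if_pos trivial]
      have ih' := ih (max m (c + 1)) (c + 1) (by omega) (le_max_right _ _)
      rw [ih']
      have hb : c + 1 ≤ barB t (c + 1) := barB_nonneg t (c + 1)
      simp only [barB]
      omega
    | false =>
      simp only [List.foldl_cons]
      rw [if_neg (by decide)]
      have ih' := ih m 0 le_rfl (by omega)
      rw [ih']
      have hb : (0 : Int) ≤ barB t 0 := barB_nonneg t 0
      simp only [barB]
      omega

-- ===== VERDICT (by name: the statement is the Claim_ definition above) =====
theorem get_max_consecutive_working_days_spec : Claim_equal_get_max_consecutive_working_days := by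
  intro shifts _
  unfold Spec_get_max_consecutive_working_days
  unfold get_max_consecutive_working_days get_max_consecutive_working_days_alt
  rw [altLoop_eq _ 0 le_rfl]
  have hmap :
      (shifts.foldl
        (fun (st : Int × Int) shift =>
          if shift ∈ ["D", "N"] then (max st.1 (st.2 + 1), st.2 + 1)
          else (st.1, 0)) (0, 0))
      = ((shifts.map (fun s => decide (s ∈ ["D", "N"]))).foldl
        (fun (st : Int × Int) b =>
          if b then (max st.1 (st.2 + 1), st.2 + 1) else (st.1, 0)) (0, 0)) := by
    rw [List.foldl_map]
    simp
  rw [hmap, foldA_eq _ 0 0 le_rfl le_rfl]
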